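-- pv_equiv track=rewrite | github.com/THC-ENG/Colon_Diverticulosis_Project | tools/run_full_flywheel.py | _pick_stratified
-- ===== SOURCE A (Python) =====
-- def _pick_stratified(rows: list[dict], target: int, preferred_ids: list[str]) -> list[dict]:
--     target = int(max(0, target))
--     if target <= 0:
--         return []
--     if not rows:
--         return []
--
--     by_id = {}
--     ordered = []
--     for r in rows:
--         pid = str(r.get("id", "")).strip()
--         if not pid or pid in by_id:
--             continue
--         by_id[pid] = r
--         ordered.append(r)
--
--     selected = []
--     selected_ids = set()
--     for pid in preferred_ids:
--         if len(selected) >= target: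
--             break
--         if pid in by_id and pid not in selected_ids:
--             selected.append(by_id[pid])
--             selected_ids.add(pid)
--
--     remain = [r for r in ordered if str(r.get("id", "")).strip() not in selected_ids]
--     groups = {}
--     for r in remain:
--         src = str(r.get("source", "")).strip() or "unknown"
--         groups.setdefault(src, []).append(r)
--
--     while len(selected) < target:
--         non_empty = [(k, v) for k, v in groups.items() if v]
--         if not non_empty:
--             break
--         non_empty.sort(key=lambda kv: len(kv[1]), reverse=True)
--         for _, lst in non_empty:
--             if len(selected) >= target:
--                 break
--             selected.append(lst.pop(0))
--     return selected
-- ===== SOURCE B (Python) =====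
-- def _pick_stratified(rows: list[dict], target: int, preferred_ids: list[str]) -> list[dict]:
--     target = int(max(0, target))
--     if target <= 0 or not rows:
--         return []
--
--     by_id = {}
--     ordered = []
--     for r in rows:
--         pid = str(r.get("id", "")).strip()
--         if pid and pid not in by_id:
--             by_id[pid] = r
--             ordered.append(r)
--
--     selected = []
--     selected_ids = set()
--     for pid in preferred_ids:
--         if len(selected) >= target:
--             break
--         if pid in by_id and pid not in selected_ids:
--             selected.append(by_id[pid])
--             selected_ids.add(pid)
--
--     groups = {}
--     for r in ordered:
--         if str(r.get("id", "")).strip() not in selected_ids: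
--             src = str(r.get("source", "")).strip() or "unknown"
--             groups.setdefault(src, []).append(r)
--
--     # One stable sort by size (descending); group sizes all shrink in lockstep
--     # during round-robin, so the per-pass order never changes: read column k
--     # of the sorted group lists instead of re-sorting and pop(0)-ing.
--     glists = sorted(groups.values(), key=len, reverse=True)
--     need = target - len(selected)
--     k = 0
--     while need > 0 and glists and k < len(glists[0]):
--         for lst in glists:
--             if len(lst) <= k or need <= 0:
--                 break
--             selected.append(lst[k])
--             need -= 1
--         k += 1
--     return selected
-- ===== Notes on version B (the rewrite author's own statement) =====
-- stated objective: alternative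
-- what changed: Replaces A's while-loop that re-sorts the non-empty groups and pop(0)s the front element on every round-robin pass with a single stable sort of the group lists by size followed by reading column k of that fixed order on pass k (group sizes shrink in lockstep, so the per-pass order never changes).
import Mathlib
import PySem

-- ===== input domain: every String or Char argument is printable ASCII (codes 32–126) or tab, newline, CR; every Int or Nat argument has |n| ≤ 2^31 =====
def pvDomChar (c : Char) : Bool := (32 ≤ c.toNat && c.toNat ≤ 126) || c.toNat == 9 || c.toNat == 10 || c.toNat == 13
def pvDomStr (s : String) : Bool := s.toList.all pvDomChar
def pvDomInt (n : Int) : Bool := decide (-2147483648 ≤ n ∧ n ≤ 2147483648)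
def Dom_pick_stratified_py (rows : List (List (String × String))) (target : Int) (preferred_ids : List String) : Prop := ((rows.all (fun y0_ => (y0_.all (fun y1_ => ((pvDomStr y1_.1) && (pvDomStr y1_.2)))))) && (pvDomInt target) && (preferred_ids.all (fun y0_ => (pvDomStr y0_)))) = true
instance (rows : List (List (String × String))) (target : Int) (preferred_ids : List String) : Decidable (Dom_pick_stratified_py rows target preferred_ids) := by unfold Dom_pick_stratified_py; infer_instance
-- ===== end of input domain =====

-- B replaces A's round-robin (re-sort the groups and pop(0) on every pass) by one stable
-- sort of the group lists by size, reading column k of that fixed order on pass k (group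
-- sizes shrink in lockstep, so the per-pass order never changes); objective: alternative.
-- Return-value equivalence (neither side mutates its arguments).

abbrev PRow : Type := List (String × String)

-- row accessors shared by both Pythons verbatim: str(r.get(key, "")).strip(), and the source fallback
def pvPid (r : PRow) : String := PySem.Str.strip ((PySem.Dict.mk r).getD "id" "")

def pvSrc (r : PRow) : String :=
  let s := PySem.Str.strip ((PySem.Dict.mk r).getD "source" "")
  if s = "" then "unknown" else s

-- the preferred-ids loop, textually identical in A and in B
def pvPref (target : Int) : List String → PySem.Dict String PRow → List PRow → PySem.Set String → List PRow × PySem.Set String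
  | [], _, sel, sids => (sel, sids)
  | pid :: rest, byId, sel, sids =>
    if target ≤ (sel.length : Int) then (sel, sids)
    else if byId.contains pid ∧ ¬ PySem.Set.contains sids pid then
      pvPref target rest byId (sel ++ [byId.getD pid []]) (PySem.Set.add sids pid)
    else pvPref target rest byId sel sids

-- ===== PORT A =====

-- A's dedupe loop: 'if not pid or pid in by_id: continue'
def pvDedupA (rows : List PRow) : PySem.Dict String PRow × List PRow :=
  rows.foldl (fun st r =>
    let pid := pvPid r
    if pid = "" ∨ st.1.contains pid then st
    else (st.1.insert pid r, st.2 ++ [r])) (PySem.Dict.empty, [])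

-- A's grouping loop over the 'remain' list: groups.setdefault(src, []).append(r)
def pvGroupsA (remain : List PRow) : PySem.Dict String (List PRow) :=
  remain.foldl (fun d r => d.modify (pvSrc r) [] (fun l => l ++ [r])) PySem.Dict.empty

-- A's inner 'for _, lst in non_empty' loop; lst.pop(0) writes the tail back into the dict
-- (the [] branch is Python's IndexError side; it is unreachable: entries come from the non-empty filter)
def pvInnerA (target : Int) : List (String × List PRow) → PySem.Dict String (List PRow) → List PRow → PySem.Dict String (List PRow) × List PRow
  | [], g, sel => (g, sel)
  | (k, lst) :: rest, g, sel =>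
    if target ≤ (sel.length : Int) then (g, sel)
    else match lst with
      | [] => (g, sel)
      | x :: xs => pvInnerA target rest (g.insert k xs) (sel ++ [x])

-- A's 'while len(selected) < target' loop (fuel: selected grows each pass, so target.toNat passes suffice)
def pvWhileA (target : Int) : Nat → PySem.Dict String (List PRow) → List PRow → List PRow
  | 0, _, sel => sel
  | fuel + 1, g, sel =>
    if target ≤ (sel.length : Int) then sel
    else
      let ne := g.items.filter (fun kv => !kv.2.isEmpty)
      if ne = [] then sel
      else
        let s := PySem.List.sorted ne (fun kv => (kv.2.length : Int)) true
        let p := pvInnerA target s g sel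
        pvWhileA target fuel p.1 p.2

def pick_stratified_py (rows : List (List (String × String))) (target : Int) (preferred_ids : List String) : List (List (String × String)) :=
  let t := max 0 target
  if t ≤ 0 then []
  else if rows = [] then []
  else
    let st := pvDedupA rows
    let ps := pvPref t preferred_ids st.1 [] PySem.Set.empty
    let remain := st.2.filter (fun r => !(PySem.Set.contains ps.2 (pvPid r)))
    let groups := pvGroupsA remain
    pvWhileA t t.toNat groups ps.1

-- ===== PORT B =====

-- B's dedupe loop: 'if pid and pid not in by_id: …'
def pvDedupB (rows : List PRow) : PySem.Dict String PRow × List PRow :=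
  rows.foldl (fun st r =>
    let pid := pvPid r
    if pid ≠ "" ∧ ¬ st.1.contains pid then (st.1.insert pid r, st.2 ++ [r])
    else st) (PySem.Dict.empty, [])

-- B's fused grouping loop over 'ordered' with the selected-ids test inline
def pvGroupsB (ordered : List PRow) (sids : PySem.Set String) : PySem.Dict String (List PRow) :=
  ordered.foldl (fun d r =>
    if PySem.Set.contains sids (pvPid r) then d
    else d.modify (pvSrc r) [] (fun l => l ++ [r])) PySem.Dict.empty

-- B's inner 'for lst in glists' loop of pass k: append lst[k] until a short list or need = 0
def pvInnerB (k : Nat) : List (List PRow) → List PRow → Int → List PRow × Int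
  | [], sel, need => (sel, need)
  | lst :: rest, sel, need =>
    if lst.length ≤ k ∨ need ≤ 0 then (sel, need)
    else pvInnerB k rest (sel ++ [lst.getD k []]) (need - 1)

-- B's 'while need > 0 and glists and k < len(glists[0])' loop (fuel: need shrinks each pass)
def pvLoopB (glists : List (List PRow)) : Nat → Nat → List PRow → Int → List PRow
  | 0, _, sel, _ => sel
  | fuel + 1, k, sel, need =>
    if need ≤ 0 then sel
    else match glists with
      | [] => sel
      | g0 :: _ =>
        if g0.length ≤ k then sel
        else
          let p := pvInnerB k glists sel need
          pvLoopB glists fuel (k + 1) p.1 p.2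

def pick_stratified_py_alt (rows : List (List (String × String))) (target : Int) (preferred_ids : List String) : List (List (String × String)) :=
  let t := max 0 target
  if t ≤ 0 ∨ rows = [] then []
  else
    let st := pvDedupB rows
    let ps := pvPref t preferred_ids st.1 [] PySem.Set.empty
    let glists := PySem.List.sorted (pvGroupsB st.2 ps.2).values (fun l => (l.length : Int)) true
    pvLoopB glists t.toNat 0 ps.1 (t - (ps.1.length : Int))

-- ===== PRECONDITION & SPEC =====
def Spec_pick_stratified_py (rows : List (List (String × String))) (target : Int) (preferred_ids : List String) (out : List (List (String × String))) : Prop := out = pick_stratified_py_alt rows target preferred_ids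
instance (rows : List (List (String × String))) (target : Int) (preferred_ids : List String) (out : List (List (String × String))) : Decidable (Spec_pick_stratified_py rows target preferred_ids out) := by unfold Spec_pick_stratified_py; infer_instance

-- ===== CLAIM (what is proved, stated in full; the proofs are below) =====
def Claim_equal_pick_stratified_py : Prop := ∀ (rows : List (List (String × String))) (target : Int) (preferred_ids : List String), Dom_pick_stratified_py rows target preferred_ids → Spec_pick_stratified_py rows target preferred_ids (pick_stratified_py rows target preferred_ids)

-- ===== LEMMAS AND PROOFS =====

-- keys of a Nodup-keyed association list determine the entries
theorem pvKeyInj {α β : Type} {l : List (α × β)} (h : (l.map (·.1)).Nodup)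
    {a b : α × β} (ha : a ∈ l) (hb : b ∈ l) (hk : a.1 = b.1) : a = b := by
  induction l with
  | nil => cases ha
  | cons x t ih =>
    simp only [List.map_cons, List.nodup_cons] at h
    rcases List.mem_cons.1 ha with rfl | ha' <;> rcases List.mem_cons.1 hb with rfl | hb'
    · rfl
    · exact absurd (hk ▸ List.mem_map_of_mem hb') h.1
    · exact absurd (hk ▸ List.mem_map_of_mem ha') h.1
    · exact ih h.2 ha' hb'

theorem pvInsertBy_cons_pos {α : Type} (bf : α → α → Bool) (x y : α) (t : List α)
    (h : bf x y = true) : PySem.List.insertBy bf x (y :: t) = x :: y :: t := by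
  simp [PySem.List.insertBy, h]

theorem pvInsertBy_cons_neg {α : Type} (bf : α → α → Bool) (x y : α) (t : List α)
    (h : bf x y = false) : PySem.List.insertBy bf x (y :: t) = y :: PySem.List.insertBy bf x t := by
  simp [PySem.List.insertBy, h]

theorem pvInsertByPrepend {α : Type} (bf : α → α → Bool) (x : α) (l : List α)
    (h : ∀ z ∈ l, bf x z = true) : PySem.List.insertBy bf x l = x :: l := by
  cases l with
  | nil => simp [PySem.List.insertBy]
  | cons y t => simp [PySem.List.insertBy, h y (by simp)]

theorem pvFilterInsertBy {α : Type} (key : α → Int) (p : α → Bool) :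
    ∀ (ys : List α), ys.Pairwise (fun a b => key b ≤ key a) → ∀ x,
    (PySem.List.insertBy (fun a b => decide (key b < key a)) x ys).filter p
      = if p x = true then PySem.List.insertBy (fun a b => decide (key b < key a)) x (ys.filter p)
        else ys.filter p := by
  intro ys
  induction ys with
  | nil =>
    intro _ x
    by_cases hp : p x = true <;> simp [PySem.List.insertBy, hp]
  | cons y t ih =>
    intro hpair x
    rw [List.pairwise_cons] at hpair
    by_cases hxy : key y < key x
    · rw [pvInsertBy_cons_pos _ _ _ _ (by simpa using hxy)]
      by_cases hp : p x = true
      · rw [List.filter_cons_of_pos hp, if_pos hp]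
        rw [pvInsertByPrepend]
        intro z hz
        have hz' : z ∈ y :: t := List.mem_of_mem_filter hz
        have hzy : key z ≤ key y := by
          rcases List.mem_cons.1 hz' with rfl | hmem
          · exact le_refl _
          · exact hpair.1 z hmem
        simp only [decide_eq_true_eq]
        omega
      · simp only [Bool.not_eq_true] at hp
        rw [List.filter_cons_of_neg (by simp [hp]), if_neg (by simp [hp])]
    · rw [pvInsertBy_cons_neg _ _ _ _ (by simpa using hxy)]
      by_cases hpy : p y = true
      · rw [List.filter_cons_of_pos hpy, ih hpair.2 x, List.filter_cons_of_pos hpy]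
        by_cases hp : p x = true
        · rw [if_pos hp, if_pos hp, pvInsertBy_cons_neg _ _ _ _ (by simpa using hxy)]
        · rw [if_neg hp, if_neg hp]
      · rw [List.filter_cons_of_neg (by simp [hpy]), ih hpair.2 x,
          List.filter_cons_of_neg (by simp [hpy])]

theorem pvSortedFilter {α : Type} (key : α → Int) (p : α → Bool) (xs : List α) :
    PySem.List.sorted (xs.filter p) key true = (PySem.List.sorted xs key true).filter p := by
  have hstep : ∀ (l : List α) (x : α), PySem.List.sorted (l ++ [x]) key true
      = PySem.List.insertBy (fun a b => decide (key b < key a)) x (PySem.List.sorted l key true) := by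
    intro l x
    rw [PySem.List.sorted_rev_eq_foldl_insertBy, PySem.List.sorted_rev_eq_foldl_insertBy,
      List.foldl_append]
    rfl
  induction xs using List.reverseRecOn with
  | nil => rfl
  | append_singleton t x ih =>
    rw [List.filter_append, hstep t x,
      pvFilterInsertBy key p _ (PySem.List.sorted_pairwise_rev t key) x]
    by_cases hp : p x = true
    · simp only [hp, if_pos, List.filter_cons_of_pos hp, List.filter_nil]
      rw [hstep (t.filter p) x, ih]
    · simp only [Bool.not_eq_true] at hp
      simp [hp, ih]

theorem pvInsertBy_map {α β : Type} (bf : α → α → Bool) (bf' : β → β → Bool) (g : α → β)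
    (x : α) : ∀ (ys : List α), (∀ y ∈ ys, bf' (g x) (g y) = bf x y) →
    PySem.List.insertBy bf' (g x) (ys.map g) = (PySem.List.insertBy bf x ys).map g := by
  intro ys
  induction ys with
  | nil => intro _; simp [PySem.List.insertBy]
  | cons y t ih =>
    intro h
    simp only [List.map_cons, PySem.List.insertBy]
    rw [h y (by simp)]
    by_cases hb : bf x y = true
    · simp [hb]
    · simp only [Bool.not_eq_true] at hb
      simp [hb, ih (fun z hz => h z (by simp [hz]))]

theorem pvSortedCongMap {α β : Type} (k1 : α → Int) (k2 : β → Int) (g : α → β)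
    (xs : List α) (h : ∀ a ∈ xs, ∀ b ∈ xs, (decide (k2 (g b) < k2 (g a)) = decide (k1 b < k1 a))) :
    PySem.List.sorted (xs.map g) k2 true = (PySem.List.sorted xs k1 true).map g := by
  rw [PySem.List.sorted_rev_eq_foldl_insertBy, PySem.List.sorted_rev_eq_foldl_insertBy]
  suffices H : ∀ (l : List α) (acc : List α),
      (∀ a, (a ∈ l ∨ a ∈ acc) → ∀ b, (b ∈ l ∨ b ∈ acc) → (decide (k2 (g b) < k2 (g a)) = decide (k1 b < k1 a))) →
      (l.map g).foldl (fun acc x => PySem.List.insertBy (fun a b => decide (k2 b < k2 a)) x acc) (acc.map g)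
        = (l.foldl (fun acc x => PySem.List.insertBy (fun a b => decide (k1 b < k1 a)) x acc) acc).map g by
    have := H xs [] (by intro a ha b hb; simp at ha hb; exact h a ha b hb)
    simpa using this
  intro l
  induction l with
  | nil => intro acc _; simp
  | cons x t ih =>
    intro acc h
    simp only [List.map_cons, List.foldl_cons]
    rw [pvInsertBy_map (fun a b => decide (k1 b < k1 a)) (fun a b => decide (k2 b < k2 a)) g x acc
        (fun y hy => h x (Or.inl (by simp)) y (Or.inr hy))]
    exact ih (PySem.List.insertBy _ x acc) (by
      intro a ha b hb
      apply h
      · rcases ha with ha | ha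
        · exact Or.inl (by simp [ha])
        · rcases (PySem.List.mem_insertBy _ _ _ _).1 ha with rfl | ha'
          · exact Or.inl (by simp)
          · exact Or.inr ha'
      · rcases hb with hb | hb
        · exact Or.inl (by simp [hb])
        · rcases (PySem.List.mem_insertBy _ _ _ _).1 hb with rfl | hb'
          · exact Or.inl (by simp)
          · exact Or.inr hb')



-- selected part of A's inner loop: the first (target - len) entries' heads get appended
theorem pvInnerA_sel (t : Int) : ∀ (L : List (String × List PRow)) (g : PySem.Dict String (List PRow)) (sel : List PRow),
    (∀ q ∈ L, q.2 ≠ []) →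
    (pvInnerA t L g sel).2 = sel ++ (L.take (t - (sel.length : Int)).toNat).map (fun q => q.2.headD []) := by
  intro L
  induction L with
  | nil => intro g sel _; simp [pvInnerA]
  | cons q rest ih =>
    obtain ⟨kk, lst⟩ := q
    intro g sel h
    by_cases hT : t ≤ (sel.length : Int)
    · have h0 : (t - (sel.length : Int)).toNat = 0 := by omega
      simp [pvInnerA, hT, h0]
    · obtain ⟨x, xs, rfl⟩ : ∃ x xs, lst = x :: xs := by
        cases lst with
        | nil => exact absurd rfl (h (kk, []) (by simp))
        | cons a b => exact ⟨a, b, rfl⟩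
      have hm : (t - (sel.length : Int)).toNat = (t - ((sel.length : Int) + 1)).toNat + 1 := by omega
      simp only [pvInnerA, if_neg hT]
      rw [ih _ _ (fun q hq => h q (by simp [hq]))]
      simp [hm, List.take_succ_cons]

-- dict part of A's inner loop on a full (no-break) pass: every processed key's list loses its head
theorem pvInnerA_dict (t : Int) : ∀ (L : List (String × List PRow)) (g : PySem.Dict String (List PRow)) (sel : List PRow),
    (∀ q ∈ L, q.2 ≠ []) → (∀ q ∈ L, q ∈ g.items) → (L.map (·.1)).Nodup → g.keys.Nodup →
    ((L.length : Int) ≤ t - (sel.length : Int)) →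
    (pvInnerA t L g sel).1.items
      = g.items.map (fun q => if q.1 ∈ L.map (·.1) then (q.1, q.2.tail) else q) := by
  intro L
  induction L with
  | nil => intro g sel _ _ _ _ _; simp [pvInnerA]
  | cons q rest ih =>
    obtain ⟨kk, lst⟩ := q
    intro g sel h1 h2 h3 h4 h5
    have hT : ¬ t ≤ (sel.length : Int) := by
      simp only [List.length_cons] at h5; push_cast at h5; omega
    obtain ⟨x, xs, rfl⟩ : ∃ x xs, lst = x :: xs := by
      cases lst with
      | nil => exact absurd rfl (h1 (kk, []) (by simp))
      | cons a b => exact ⟨a, b, rfl⟩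
    have hmem : (kk, x :: xs) ∈ g.items := h2 _ (by simp)
    have hkmem : kk ∈ g.keys :=
      List.mem_map_of_mem (f := fun x : String × List PRow => x.1) hmem
    have hc : g.contains kk = true := (PySem.Dict.contains_iff_mem_keys _ _).2 hkmem
    have hkk : kk ∉ rest.map (·.1) := by
      simp only [List.map_cons, List.nodup_cons] at h3; exact h3.1
    simp only [pvInnerA, if_neg hT]
    rw [ih (g.insert kk xs) (sel ++ [x])
      (fun q hq => h1 q (by simp [hq]))
      (fun q hq => (PySem.Dict.mem_items_insert _ _ _ _).2
        (Or.inr ⟨h2 q (by simp [hq]), fun hqe => hkk (hqe ▸ List.mem_map_of_mem hq)⟩))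
      (by simp only [List.map_cons, List.nodup_cons] at h3; exact h3.2)
      (by rw [PySem.Dict.keys_insert_of_contains _ _ hc]; exact h4)
      (by simp only [List.length_cons, List.length_append, List.length_nil] at h5 ⊢
          push_cast at h5 ⊢; omega)]
    rw [PySem.Dict.items_insert_of_contains _ _ hc, List.map_map]
    apply List.map_congr_left
    intro p hp
    have hgnd : (g.items.map (·.1)).Nodup := h4
    by_cases hpk : p.1 = kk
    · have hpe : p = (kk, x :: xs) := pvKeyInj hgnd hp hmem hpk
      subst hpe
      simp [hkk]
    · have hne : (p.1 == kk) = false := by simpa using hpk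
      simp only [Function.comp_apply, hne, Bool.false_eq_true, if_false, List.map_cons]
      by_cases hr : p.1 ∈ rest.map (·.1)
      · simp [hr, hpk]
      · simp [hr, hpk]

-- B's inner loop appends column k of the long-enough prefix, clipped to need
theorem pvInnerB_eq (k : Nat) : ∀ (gl : List (List PRow)) (sel : List PRow) (need : Int),
    pvInnerB k gl sel need
      = (sel ++ ((gl.takeWhile (fun l => decide (k < l.length))).take need.toNat).map (fun l => l.getD k []),
         need - (((gl.takeWhile (fun l => decide (k < l.length))).take need.toNat).length : Int)) := by
  intro gl
  induction gl with
  | nil => intro sel need; simp [pvInnerB]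
  | cons lst rest ih =>
    intro sel need
    by_cases h1 : lst.length ≤ k
    · have : decide (k < lst.length) = false := by simpa using h1
      simp [pvInnerB, h1, this]
    · by_cases h2 : need ≤ 0
      · have h0 : need.toNat = 0 := by omega
        simp [pvInnerB, h1, h2, h0]
      · have hc : decide (k < lst.length) = true := by simpa using h1
        have hm : need.toNat = (need - 1).toNat + 1 := by omega
        rw [show pvInnerB k (lst :: rest) sel need = pvInnerB k rest (sel ++ [lst.getD k []]) (need - 1) by
          simp [pvInnerB, h1, h2]]
        rw [ih]
        simp only [List.takeWhile_cons, hc, if_true, hm, List.take_succ_cons, List.map_cons,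
          List.length_cons, Prod.mk.injEq]
        refine ⟨by simp, by push_cast; omega⟩

-- on a size-descending list, takeWhile (k < len) is filter (k < len)
theorem pvTakeWhileFilter (k : Nat) : ∀ (l : List (List PRow)),
    l.Pairwise (fun a b => b.length ≤ a.length) →
    l.takeWhile (fun a => decide (k < a.length)) = l.filter (fun a => decide (k < a.length)) := by
  intro l
  induction l with
  | nil => intro _; rfl
  | cons a t ih =>
    intro hp
    rw [List.pairwise_cons] at hp
    by_cases h : k < a.length
    · simp [h, ih hp.2]
    · have h1 : decide (k < a.length) = false := by simpa using h
      simp only [List.takeWhile_cons, h1, if_false, Bool.false_eq_true]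
      symm
      rw [List.filter_eq_nil_iff]
      intro b hb
      rcases List.mem_cons.1 hb with rfl | hb'
      · simp; omega
      · have := hp.1 b hb'
        simp; omega

theorem pvWhileA_done (t : Int) (fuel : Nat) (g : PySem.Dict String (List PRow)) (sel : List PRow)
    (h : t ≤ (sel.length : Int)) : pvWhileA t fuel g sel = sel := by
  cases fuel <;> simp [pvWhileA, h]

theorem pvLoopB_done (gl : List (List PRow)) (fuel : Nat) (k : Nat) (sel : List PRow) (need : Int)
    (h : need ≤ 0) : pvLoopB gl fuel k sel need = sel := by
  cases fuel <;> simp [pvLoopB, h]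

-- the core correspondence: A's re-sort-and-pop loop ≡ B's column scan of the once-sorted lists
theorem pvCore (t : Int) (I0 : List (String × List PRow)) (hnd : (I0.map (·.1)).Nodup) :
    ∀ (fuel : Nat) (k : Nat) (g : PySem.Dict String (List PRow)) (sel : List PRow),
    g.items = I0.map (fun q => (q.1, q.2.drop k)) →
    t ≤ (sel.length : Int) + (fuel : Int) →
    pvWhileA t fuel g sel
      = pvLoopB ((PySem.List.sorted I0 (fun q => (q.2.length : Int)) true).map (·.2)) fuel k sel (t - (sel.length : Int)) := by
  intro fuel
  induction fuel with
  | zero => intro k g sel _ _; rfl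
  | succ n ih =>
    intro k g sel hg hf
    set key : String × List PRow → Int := (fun q => (q.2.length : Int)) with hkey
    set W := PySem.List.sorted I0 key true with hW
    by_cases hdone : t ≤ (sel.length : Int)
    · rw [pvWhileA_done _ _ _ _ hdone, pvLoopB_done _ _ _ _ _ (by omega)]
    · have hperm : W.Perm I0 := by rw [hW]; exact PySem.List.sorted_perm I0 key true
      have hneed : ¬ (t - (sel.length : Int) ≤ 0) := by omega
      have hne_eq : g.items.filter (fun kv => !kv.2.isEmpty)
          = (I0.filter (fun q => decide (k < q.2.length))).map (fun q => (q.1, q.2.drop k)) := by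
        rw [hg, List.filter_map]
        congr 1
        apply List.filter_congr
        intro q _
        show (!(q.2.drop k).isEmpty) = decide (k < q.2.length)
        rcases Nat.lt_or_ge k q.2.length with h | h
        · have hne : q.2.drop k ≠ [] := by
            intro hcon
            have := List.drop_eq_nil_iff.1 hcon
            omega
          simp [hne, h]
        · have hnil : q.2.drop k = [] := List.drop_eq_nil_of_le h
          simp only [hnil, List.isEmpty_nil, Bool.not_true]
          symm
          simpa using by omega
      by_cases hFe : I0.filter (fun q => decide (k < q.2.length)) = []
      · -- no group still has an element to give: both loops stop with sel
        have hneA : g.items.filter (fun kv => !kv.2.isEmpty) = [] := by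
          rw [hne_eq, hFe]; rfl
        have hall : ∀ q ∈ I0, ¬ (k < q.2.length) := by
          intro q hq
          have := List.filter_eq_nil_iff.1 hFe q hq
          simpa using this
        rw [show pvWhileA t (n+1) g sel = sel by simp [pvWhileA, hdone, hneA]]
        cases hWl : W with
        | nil => simp [pvLoopB, hneed]
        | cons w0 Wt =>
          have hw0 : w0 ∈ I0 := hperm.mem_iff.1 (by rw [hWl]; simp)
          have hle : w0.2.length ≤ k := Nat.le_of_not_lt (hall w0 hw0)
          simp [pvLoopB, hneed, hle]
      · -- a real pass happens on both sides
        set F := I0.filter (fun q => decide (k < q.2.length)) with hF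
        set WF := W.filter (fun q => decide (k < q.2.length)) with hWF
        have hpermF : WF.Perm F := hperm.filter _
        have hWFne : WF ≠ [] := by
          intro hcon
          apply hFe
          have := hpermF.length_eq
          rw [hcon] at this
          exact List.length_eq_zero_iff.1 this.symm
        have hWne : W ≠ [] := by
          intro hcon
          apply hWFne
          rw [hWF, hcon]
          rfl
        have hpair : W.Pairwise (fun a b => key b ≤ key a) := by
          rw [hW]; exact PySem.List.sorted_pairwise_rev I0 key
        have hcong : ∀ a ∈ F, ∀ b ∈ F,
            decide (key ((fun q => (q.1, q.2.drop k)) b) < key ((fun q => (q.1, q.2.drop k)) a))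
              = decide (key b < key a) := by
          intro a ha b hb
          have ha' : k < a.2.length := by
            have := (List.mem_filter.1 (hF ▸ ha)).2; simpa using this
          have hb' : k < b.2.length := by
            have := (List.mem_filter.1 (hF ▸ hb)).2; simpa using this
          rw [decide_eq_decide]
          simp only [hkey, List.length_drop]
          omega
        have hS : PySem.List.sorted (g.items.filter (fun kv => !kv.2.isEmpty)) key true
            = WF.map (fun q => (q.1, q.2.drop k)) := by
          rw [hne_eq]
          rw [pvSortedCongMap key key (fun q => (q.1, q.2.drop k)) F hcong]
          rw [hWF, hW, hF, pvSortedFilter]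
        set S := WF.map (fun q => (q.1, q.2.drop k)) with hSdef
        obtain ⟨w0, Wt, hWl⟩ := List.exists_cons_of_ne_nil hWne
        have hw0 : k < w0.2.length := by
          obtain ⟨q0, hq0WF⟩ := List.exists_mem_of_ne_nil WF hWFne
          have hq0k : k < q0.2.length := by
            have := (List.mem_filter.1 (hWF ▸ hq0WF)).2; simpa using this
          have hq0W : q0 ∈ W := List.mem_of_mem_filter (hWF ▸ hq0WF)
          rcases List.mem_cons.1 (hWl ▸ hq0W) with rfl | hmemt
          · exact hq0k
          · have hp' := hWl ▸ hpair
            have hle := (List.pairwise_cons.1 hp').1 q0 hmemt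
            simp only [hkey] at hle
            omega
        -- one step of A
        have hSentries : ∀ q ∈ S, q.2 ≠ [] := by
          intro q hq
          rw [hSdef] at hq
          obtain ⟨w, hw, rfl⟩ := List.mem_map.1 hq
          have hwk : k < w.2.length := by
            have := (List.mem_filter.1 (hWF ▸ hw)).2; simpa using this
          intro hcon
          have := List.drop_eq_nil_iff.1 hcon
          omega
        have hneB : ¬ (g.items.filter (fun kv => !kv.2.isEmpty) = []) := by
          rw [hne_eq]
          simpa using hFe
        have hA : pvWhileA t (n+1) g sel
            = pvWhileA t n (pvInnerA t S g sel).1 (pvInnerA t S g sel).2 := by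
          simp only [pvWhileA, if_neg hdone, if_neg hneB]
          rw [hS]
        have hB : pvLoopB (W.map (·.2)) (n+1) k sel (t - (sel.length : Int))
            = pvLoopB (W.map (·.2)) n (k+1)
                (pvInnerB k (W.map (·.2)) sel (t - (sel.length : Int))).1
                (pvInnerB k (W.map (·.2)) sel (t - (sel.length : Int))).2 := by
          conv_lhs => rw [hWl]
          simp only [List.map_cons, pvLoopB, if_neg hneed, if_neg (by omega : ¬ w0.2.length ≤ k)]
          rw [← List.map_cons, ← hWl]
        set need : Int := t - (sel.length : Int) with hneedDef
        set m : Nat := need.toNat with hm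
        set app := (WF.take m).map (fun q => q.2.getD k []) with happdef
        have hAsel : (pvInnerA t S g sel).2 = sel ++ app := by
          rw [pvInnerA_sel t S g sel hSentries]
          congr 1
          rw [hSdef, ← List.map_take, List.map_map, happdef]
          apply List.map_congr_left
          intro q hq
          have hqk : k < q.2.length := by
            have := (List.mem_filter.1 (hWF ▸ (List.mem_of_mem_take hq))).2
            simpa using this
          show (q.2.drop k).headD [] = q.2.getD k []
          rw [List.headD_eq_head?_getD, List.head?_drop, List.getD_eq_getElem?_getD]
        have hpairW : (W.map (·.2)).Pairwise (fun (a b : List PRow) => b.length ≤ a.length) := by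
          apply List.Pairwise.map
          · intro a b hab
            have hab' : (b.2.length : Int) ≤ (a.2.length : Int) := hab
            exact_mod_cast hab'  
          · exact hpair
        have hTW : (W.map (·.2)).takeWhile (fun l => decide (k < l.length)) = WF.map (·.2) := by
          rw [pvTakeWhileFilter k _ hpairW, List.filter_map, hWF]
          rfl
        have hBp : pvInnerB k (W.map (·.2)) sel need = (sel ++ app, need - (app.length : Int)) := by
          rw [pvInnerB_eq k (W.map (·.2)) sel need, hTW]
          have h1 : ((WF.map (·.2)).take m).map (fun l => l.getD k []) = app := by
            rw [← List.map_take, List.map_map, happdef]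
            rfl
          have h2 : ((WF.map (·.2)).take m).length = app.length := by
            rw [← h1, List.length_map]
          rw [h1, h2]
        have hlenS : S.length = WF.length := by rw [hSdef, List.length_map]
        by_cases hcase : WF.length ≤ m
        · -- full pass: every active group loses its head; recurse with k+1
          have htake : WF.take m = WF := List.take_of_length_le hcase
          have happlen : app.length = WF.length := by rw [happdef, htake, List.length_map]
          have hSsub : ∀ q ∈ S, q ∈ g.items := by
            intro q hq
            rw [hSdef] at hq
            obtain ⟨w, hw, rfl⟩ := List.mem_map.1 hq
            have hwI : w ∈ I0 := hperm.mem_iff.1 (List.mem_of_mem_filter (hWF ▸ hw))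
            rw [hg]
            exact List.mem_map_of_mem hwI
          have hSkeys : (S.map (·.1)).Nodup := by
            rw [hSdef, List.map_map]
            have h1 : (W.map (·.1)).Nodup := ((hperm.map (·.1)).nodup_iff).2 hnd
            have h2 : ((fun x : String × List PRow => x.1) ∘ (fun q : String × List PRow => (q.1, q.2.drop k)))
                = (fun x : String × List PRow => x.1) := rfl
            rw [h2]
            have hsub : WF.Sublist W := by
              rw [hWF]; exact List.filter_sublist
            exact h1.sublist (hsub.map _)
          have hgk : g.keys.Nodup := by
            show (g.items.map (fun x => x.1)).Nodup
            rw [hg, List.map_map]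
            have h2 : ((fun x : String × List PRow => x.1) ∘ (fun q : String × List PRow => (q.1, q.2.drop k)))
                = (fun x : String × List PRow => x.1) := rfl
            rw [h2]
            exact hnd
          have hkeyiff : ∀ q0 ∈ I0, ((q0.1 ∈ S.map (·.1)) ↔ k < q0.2.length) := by
            intro q0 hq0
            constructor
            · intro hmem
              rw [hSdef, List.map_map] at hmem
              obtain ⟨w, hw, hwk⟩ := List.mem_map.1 hmem
              have hwI : w ∈ I0 := hperm.mem_iff.1 (List.mem_of_mem_filter (hWF ▸ hw))
              have hwq : w = q0 := pvKeyInj hnd hwI hq0 hwk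
              have := (List.mem_filter.1 (hWF ▸ hw)).2
              rw [hwq] at this
              simpa using this
            · intro hk
              rw [hSdef, List.map_map]
              refine List.mem_map.2 ⟨q0, ?_, rfl⟩
              rw [hWF]
              exact List.mem_filter.2 ⟨hperm.mem_iff.2 hq0, by simpa using hk⟩
          have hdict : (pvInnerA t S g sel).1.items
              = I0.map (fun q => (q.1, q.2.drop (k+1))) := by
            rw [pvInnerA_dict t S g sel hSentries hSsub hSkeys hgk
              (by rw [hlenS] at *; omega)]
            rw [hg, List.map_map]
            apply List.map_congr_left
            intro q0 hq0
            by_cases hk : k < q0.2.length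
            · show (if (q0.1, q0.2.drop k).1 ∈ S.map (·.1) then
                    ((q0.1, q0.2.drop k).1, (q0.1, q0.2.drop k).2.tail)
                  else (q0.1, q0.2.drop k)) = (q0.1, q0.2.drop (k+1))
              rw [if_pos ((hkeyiff q0 hq0).2 hk)]
              simp [List.tail_drop]
            · show (if (q0.1, q0.2.drop k).1 ∈ S.map (·.1) then
                    ((q0.1, q0.2.drop k).1, (q0.1, q0.2.drop k).2.tail)
                  else (q0.1, q0.2.drop k)) = (q0.1, q0.2.drop (k+1))
              rw [if_neg (fun hmem => hk ((hkeyiff q0 hq0).1 hmem))]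
              have e1 : q0.2.drop k = [] := List.drop_eq_nil_of_le (by omega)
              have e2 : q0.2.drop (k+1) = [] := List.drop_eq_nil_of_le (by omega)
              rw [e1, e2]
          have hWFpos : 1 ≤ WF.length := List.length_pos_of_ne_nil hWFne
          rw [hA, hAsel, hB]
          simp only [hBp]
          rw [ih (k+1) _ _ hdict (by
            simp only [List.length_append, happlen]
            push_cast
            push_cast at hf
            omega)]
          congr 1
          simp only [List.length_append, happlen]
          push_cast
          omega
        · -- the target is hit inside this pass: both sides stop with sel ++ app
          have happlen : app.length = m := by
            rw [happdef, List.length_map, List.length_take]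
            omega
          rw [hA, hAsel, hB]
          simp only [hBp]
          rw [pvWhileA_done _ _ _ _ (by
            simp only [List.length_append, happlen]
            push_cast
            omega)]
          rw [pvLoopB_done _ _ _ _ _ (by
            simp only [happlen]
            omega)]

theorem pvDedup_eq (rows : List PRow) : pvDedupB rows = pvDedupA rows := by
  unfold pvDedupA pvDedupB
  congr 1
  funext st r
  by_cases h1 : pvPid r = "" <;> by_cases h2 : st.1.contains (pvPid r) <;> simp [h1, h2]

theorem pvGroups_eq (ordered : List PRow) (sids : PySem.Set String) :
    pvGroupsB ordered sids = pvGroupsA (ordered.filter (fun r => !(PySem.Set.contains sids (pvPid r)))) := by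
  unfold pvGroupsA pvGroupsB
  rw [List.foldl_filter]
  congr 1
  funext d r
  simp

-- ===== VERDICT (by name: the statement is the Claim_ definition above) =====
theorem pick_stratified_py_spec : Claim_equal_pick_stratified_py := by
  intro rows target preferred_ids _
  show pick_stratified_py rows target preferred_ids = pick_stratified_py_alt rows target preferred_ids
  simp only [pick_stratified_py, pick_stratified_py_alt]
  by_cases ht : max 0 target ≤ 0
  · simp [ht]
  · by_cases hr : rows = []
    · simp [ht, hr]
    · rw [if_neg ht, if_neg hr, if_neg (by tauto : ¬ (max 0 target ≤ 0 ∨ rows = []))]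
      rw [pvDedup_eq, pvGroups_eq]
      set t := max 0 target with htdef
      set st := pvDedupA rows with hst
      set ps := pvPref t preferred_ids st.1 [] PySem.Set.empty with hps
      set groups := pvGroupsA (st.2.filter (fun r => !(PySem.Set.contains ps.2 (pvPid r)))) with hgroups
      have hk : groups.keys.Nodup := by
        rw [hgroups]
        unfold pvGroupsA
        exact PySem.Dict.nodup_keys_foldl_modify_key _ _ _ _ _ PySem.Dict.nodup_keys_empty
      have hnd : (groups.items.map (·.1)).Nodup := hk
      have hv : PySem.List.sorted groups.values (fun l => (l.length : Int)) true
          = (PySem.List.sorted groups.items (fun q => (q.2.length : Int)) true).map (·.2) := by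
        show PySem.List.sorted (groups.items.map (·.2)) (fun l => (l.length : Int)) true = _
        exact pvSortedCongMap (fun q : String × List PRow => (q.2.length : Int))
          (fun l : List PRow => (l.length : Int)) (fun q : String × List PRow => q.2) _
          (fun a _ b _ => rfl)
      rw [hv]
      exact pvCore t groups.items hnd t.toNat 0 groups ps.1 (by simp) (by omega)
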